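-- pv_equiv track=rewrite | github.com/kiung22/algorithm-problem-solving | Programmers/challenge/5월/prob2.py | solution
-- ===== SOURCE A (Python) =====
-- def solution(numbers):
--     answer = []
--     for num in numbers:
--         if num == 0:
--             num = 1
--         else:
--             for i in range(num):
--                 if not num & (1 << i):
--                     break
--             num += (1 << i)
--             if i > 0:
--                 num -= (1 << i-1)
--         answer.append(num)
--     return answer
-- ===== SOURCE B (Python) =====
-- def solution(numbers):
--     def low_zero(n):
--         # index of the lowest zero bit, by parity recursion
--         return 0 if n % 2 == 0 else 1 + low_zero(n // 2)
--
--     def transform(n):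
--         i = low_zero(n)
--         return n + (1 << i) - ((1 << (i - 1)) if i > 0 else 0)
--
--     return [transform(n) for n in numbers]
-- ===== Notes on version B (the rewrite author's own statement) =====
-- stated objective: alternative
-- what changed: A finds each number's lowest zero bit by scanning i over range(num) and testing num & (1 << i); B computes it directly by a parity recursion (0 if n even else 1 + low_zero(n // 2)), replacing up-to-num bit tests by log(num) halvings.
-- outside the precondition, e.g. on solution([3, -2]): A returns [5, 0], B returns [5, -1]; on solution([-1]): A raises UnboundLocalError, B raises RecursionError
import Mathlib
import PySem

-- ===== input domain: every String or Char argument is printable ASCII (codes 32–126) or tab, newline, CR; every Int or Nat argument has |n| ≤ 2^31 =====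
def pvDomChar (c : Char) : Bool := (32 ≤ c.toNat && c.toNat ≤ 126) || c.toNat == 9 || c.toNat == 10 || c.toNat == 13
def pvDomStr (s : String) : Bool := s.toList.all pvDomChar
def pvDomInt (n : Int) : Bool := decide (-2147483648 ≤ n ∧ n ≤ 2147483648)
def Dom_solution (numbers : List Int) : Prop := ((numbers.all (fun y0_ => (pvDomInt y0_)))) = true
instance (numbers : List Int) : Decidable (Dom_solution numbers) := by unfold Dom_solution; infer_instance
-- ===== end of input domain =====

-- B replaces A's linear scan over range(num) for the lowest zero bit with a parity
-- recursion on num itself (objective: alternative algorithm); values agree on all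
-- non-negative inputs.

-- ===== PORT A =====
-- inner loop 'for i in range(num): if not num & (1 << i): break' — scans j upward with
-- fuel = remaining range length; 'none' = the range was empty (i would stay unbound)
def innerA (num : Int) : Nat → Nat → Option Nat
  | 0, _ => none
  | 1, j => some j                 -- last iteration: break or normal exit both leave i = j
  | f+2, j =>
      if PySem.Int.band num ((1:Int) <<< j) == 0 then some j
      else innerA num (f+1) (j+1)

-- one outer-loop iteration; state = (answer so far, current value of the Python variable i)
def solutionStep (st : List Int × Option Nat) (num : Int) : List Int × Option Nat :=
  if num == 0 then (st.1 ++ [1], st.2)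
  else
    match (match innerA num num.toNat 0 with
           | some j => some j
           | none => st.2) with            -- empty range: i keeps its leftover value
    | none => (st.1 ++ [0], none)          -- UnboundLocalError in Python; excluded by Pre_
    | some i =>
        let n1 := num + ((1:Int) <<< i)
        let n2 := if i > 0 then n1 - ((1:Int) <<< (i-1)) else n1
        (st.1 ++ [n2], some i)

def solution (numbers : List Int) : List Int :=
  (numbers.foldl solutionStep ([], none)).1

-- ===== PORT B =====
-- low_zero(n) = 0 if n % 2 == 0 else 1 + low_zero(n // 2); fuel 64 covers every |n| ≤ 2^31
-- of the domain (Python's recursion is unbounded; it diverges only on negative odd n,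
-- which Pre_ excludes)
def lowZero : Nat → Int → Nat
  | 0, _ => 0
  | f+1, n => if PySem.Int.mod n 2 == 0 then 0 else 1 + lowZero f (PySem.Int.floordiv n 2)

def transform (n : Int) : Int :=
  let i := lowZero 64 n
  n + ((1:Int) <<< i) - (if i > 0 then ((1:Int) <<< (i-1)) else 0)

def solution_alt (numbers : List Int) : List Int := numbers.map transform

-- ===== PRECONDITION & SPEC =====
-- Pre_ restricts to the task's natural domain of non-negative numbers: on a negative
-- element A raises UnboundLocalError or returns a value taken from the leftover inner-loop
-- variable of an earlier element (and B's recursion diverges on negative odd elements).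
def Pre_solution (numbers : List Int) : Prop := ∀ n ∈ numbers, 0 ≤ n
instance (numbers : List Int) : Decidable (Pre_solution numbers) := by unfold Pre_solution; infer_instance
def pvWitness_solution : List Int := [0, 1, 6, 13]

def Spec_solution (numbers : List Int) (out : List Int) : Prop := out = solution_alt numbers
instance (numbers : List Int) (out : List Int) : Decidable (Spec_solution numbers out) := by unfold Spec_solution; infer_instance

-- ===== CLAIM (what is proved, stated in full; the proofs are below) =====
def Claim_equal_solution : Prop := ∀ (numbers : List Int), Dom_solution numbers → Pre_solution numbers → Spec_solution numbers (solution numbers)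

-- ===== LEMMAS AND PROOFS =====

-- z + 2 ≤ 2^z for z ≥ 2
theorem pv_pow_gap : ∀ z : Nat, 2 ≤ z → z + 2 ≤ 2^z := by
  intro z h
  induction z with
  | zero => omega
  | succ k ih =>
    rcases Nat.lt_or_ge k 2 with h2 | h2
    · interval_cases k <;> omega
    · have h3 := ih (by omega)
      have : 2^k + 2^k = 2^(k+1) := by rw [pow_succ]; ring
      omega

-- characterisation of B's lowZero: bits below the result are set, the bit at it is clear
theorem lowZero_char : ∀ (f m : Nat), m < 2^f →
    (∀ j, j < lowZero f (↑m) → Nat.testBit m j = true) ∧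
    Nat.testBit m (lowZero f (↑m)) = false := by
  intro f
  induction f with
  | zero =>
    intro m hm
    have : m = 0 := by omega
    subst this
    simp [lowZero]
  | succ f ih =>
    intro m hm
    have hmod : PySem.Int.mod (↑m) 2 = ((m % 2 : Nat) : Int) := by
      rw [PySem.Int.mod_eq_emod_of_pos (by norm_num)]; push_cast; rfl
    have hdiv : PySem.Int.floordiv (↑m) 2 = ((m / 2 : Nat) : Int) := by
      rw [PySem.Int.floordiv_eq_ediv_of_pos (by norm_num)]; push_cast; rfl
    by_cases he : m % 2 = 0
    · have : lowZero (f+1) (↑m) = 0 := by simp [lowZero]; omega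
      rw [this]
      refine ⟨by omega, ?_⟩
      simp [Nat.testBit_zero]; omega
    · have h1 : m % 2 = 1 := by omega
      have hz : lowZero (f+1) (↑m) = 1 + lowZero f (↑(m / 2)) := by
        simp [lowZero]; omega
      have hlt : m / 2 < 2^f := by
        have : 2^(f+1) = 2^f + 2^f := by rw [pow_succ]; ring
        omega
      obtain ⟨ihs, ihc⟩ := ih (m / 2) hlt
      rw [hz]
      constructor
      · intro j hj
        cases j with
        | zero => simp [Nat.testBit_zero]; omega
        | succ j' => rw [Nat.testBit_add_one]; exact ihs j' (by omega)
      · have : 1 + lowZero f (↑(m/2)) = lowZero f (↑(m/2)) + 1 := by omega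
        rw [this, Nat.testBit_add_one]; exact ihc

-- all bits below z set forces 2^z - 1 ≤ m
theorem pv_ge_of_low_bits (m z : Nat) (h : ∀ j, j < z → Nat.testBit m j = true) :
    2^z - 1 ≤ m := by
  have he : 2^z - 1 = m % 2^z := by
    apply Nat.eq_of_testBit_eq
    intro i
    rw [Nat.testBit_mod_two_pow, Nat.testBit_two_pow_sub_one]
    by_cases hi : i < z <;> simp [hi, h]
  calc 2^z - 1 = m % 2^z := he
    _ ≤ m := Nat.mod_le _ _

-- the Python bit test, for non-negative num
theorem band_test (m j : Nat) :
    (PySem.Int.band (↑m) ((1:Int) <<< j) == 0) = !(Nat.testBit m j) := by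
  have h1 : ((1:Int) <<< j) = ((2^j : Nat) : Int) := by
    rw [Int.shiftLeft_eq]; push_cast; ring
  rw [h1, PySem.Int.band_natCast, Nat.and_two_pow]
  cases h : Nat.testBit m j <;> simp

-- A's inner scan finds exactly z when z is reachable
theorem innerA_eq (m z : Nat)
    (hset : ∀ j, j < z → Nat.testBit m j = true) (hclr : Nat.testBit m z = false) :
    ∀ f j, j ≤ z → z < j + f → innerA (↑m) f j = some z := by
  intro f
  induction f with
  | zero => intro j h1 h2; omega
  | succ f ih =>
    intro j h1 h2
    match f with
    | 0 =>
      have : j = z := by omega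
      subst this; rfl
    | f'+1 =>
      show innerA (↑m) (f'+2) j = some z
      rw [innerA, band_test]
      by_cases hj : j = z
      · subst hj; simp [hclr]
      · have hjz : j < z := by omega
        rw [hset j hjz]
        simpa using ih (j+1) (by omega) (by omega)

-- per-element agreement: one step of A appends exactly B's transform
theorem step_eq (n : Int) (h0 : 0 ≤ n) (hb : n ≤ 2^31) (acc : List Int) (io : Option Nat) :
    ∃ io', solutionStep (acc, io) n = (acc ++ [transform n], io') := by
  by_cases hz0 : n = 0
  · subst hz0
    exact ⟨io, by simp [solutionStep]; decide⟩
  · set m : Nat := n.toNat with hm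
    have hnm : (↑m : Int) = n := Int.toNat_of_nonneg h0
    have hm1 : 1 ≤ m := by omega
    have hmb : m < 2^64 := by omega
    obtain ⟨hset, hclr⟩ := lowZero_char 64 m hmb
    rw [hnm] at hset hclr
    set z : Nat := lowZero 64 n with hzdef
    by_cases hone : m = 1
    · have hn1 : n = 1 := by omega
      subst hn1
      exact ⟨some 0, by simp [solutionStep, innerA, transform]; decide⟩
    · -- m ≥ 2 : the scan reaches z
      have hzm : z < m := by
        rcases Nat.lt_or_ge z 2 with h2 | h2
        · omega
        · have hge := pv_ge_of_low_bits m z hset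
          have := pv_pow_gap z h2
          omega
      have hinner : innerA n m 0 = some z := by
        rw [← hnm]
        exact innerA_eq m z hset hclr m 0 (by omega) (by omega)
      refine ⟨some z, ?_⟩
      have hne : (n == 0) = false := by simp; omega
      simp only [solutionStep, hne, Bool.false_eq_true, if_false, ← hm, hinner]
      simp only [transform, ← hzdef]
      cases z with
      | zero => simp
      | succ z' => simp

theorem fold_eq : ∀ (l : List Int) (acc : List Int) (io : Option Nat),
    (∀ n ∈ l, 0 ≤ n ∧ n ≤ 2^31) →
    (l.foldl solutionStep (acc, io)).1 = acc ++ l.map transform := by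
  intro l
  induction l with
  | nil => intro acc io _; simp
  | cons n l ih =>
    intro acc io h
    obtain ⟨h0, hb⟩ := h n (by simp)
    obtain ⟨io', hstep⟩ := step_eq n h0 hb acc io
    rw [List.foldl_cons, hstep, ih _ io' (fun x hx => h x (by simp [hx]))]
    simp

-- ===== VERDICT (by name: the statement is the Claim_ definition above) =====
theorem solution_spec : Claim_equal_solution := by
  intro numbers dom pre
  unfold Spec_solution solution solution_alt
  have h := fold_eq numbers [] none ?_
  · simpa using h
  · intro n hn
    refine ⟨pre n hn, ?_⟩
    have := of_decide_eq_true (List.all_eq_true.mp dom n hn)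
    omega
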